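-- pv_equiv track=rewrite | github.com/recomoonmoon/leetcode_record | main.py | perfectPairs
-- ===== SOURCE A (Python) =====
-- from typing import List
--
-- def perfectPairs(nums: List[int]) -> int:
--     """
--     a = nums[i]，b = nums[j]。那么：
--     min(|a - b|, |a + b|) <= min(|a|, |b|)
--     意味着 如果 a和b同号，|a - b| <= min(|a|, |b|) 大 - 小 <= 小 -》 大 <= 2*小
--           如果 a和b异号 |a + b| <= min(|a|, |b|) 大 - 小 <= 小 -》 大 <= 2*小
--     max(|a - b|, |a + b|) >= max(|a|, |b|)
--     意味着 如果 a和b同号，|a + b| >= max(|a|, |b|) 大 + 小 >= 大 -》 符合条件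
--           如果 a和b异号 |a - b| >= max(|a|, |b|) 大 + 小 >= 小 -》 符合条件
--     """
--     n = len(nums)
--     ans = 0
--     for i in range(n-1):
--         for j in range(i+1, n):
--             a = max(abs(nums[i]), abs(nums[j]))
--             b = min(abs(nums[i]), abs(nums[j]))
--             if a <= 2*b:
--                 ans+=1
--     return ans
-- ===== SOURCE B (Python) =====
-- from typing import List
--
-- def perfectPairs(nums: List[int]) -> int:
--     # Sort absolute values; for each i, pairs (i, j>i) qualify iff s[j] <= 2*s[i].
--     # Count them with a hand-written bisect_right (upper-bound binary search).
--     s = sorted(abs(v) for v in nums)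
--     n = len(s)
--     ans = 0
--     for i, x in enumerate(s):
--         lo = 0
--         hi = n
--         while lo < hi:
--             mid = (lo + hi) // 2
--             if s[mid] <= 2 * x:
--                 lo = mid + 1
--             else:
--                 hi = mid
--         ans += lo - (i + 1)
--     return ans
-- ===== Notes on version B (the rewrite author's own statement) =====
-- stated objective: faster
-- what changed: Replaces the O(n^2) all-pairs double loop by sorting the absolute values and counting, for each element, the qualifying partners with a hand-written binary search (bisect_right).
import Mathlib
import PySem

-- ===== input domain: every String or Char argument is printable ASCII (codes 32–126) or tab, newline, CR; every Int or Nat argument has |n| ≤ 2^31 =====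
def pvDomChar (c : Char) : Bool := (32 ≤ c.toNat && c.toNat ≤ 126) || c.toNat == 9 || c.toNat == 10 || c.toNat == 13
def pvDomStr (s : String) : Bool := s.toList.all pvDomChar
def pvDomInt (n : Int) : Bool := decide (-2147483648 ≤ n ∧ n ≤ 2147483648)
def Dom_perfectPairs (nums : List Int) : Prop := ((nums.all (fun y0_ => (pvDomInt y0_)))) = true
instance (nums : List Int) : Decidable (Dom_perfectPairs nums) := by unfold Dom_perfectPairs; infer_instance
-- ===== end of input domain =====

-- B replaces A's all-pairs double loop by sorting the absolute values and, per element, a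
-- hand-written binary search counting its qualifying partners; return value proved equal on all inputs.

-- ===== PORT A =====
def perfectPairs (nums : List Int) : Int :=
  let n : Int := nums.length
  (PySem.List.pyRange 0 (n - 1) 1).foldl (fun ans i =>
    (PySem.List.pyRange (i + 1) n 1).foldl (fun ans j =>
      let a := max |PySem.List.pyGetD nums i 0| |PySem.List.pyGetD nums j 0|
      let b := min |PySem.List.pyGetD nums i 0| |PySem.List.pyGetD nums j 0|
      if a ≤ 2 * b then ans + 1 else ans) ans) 0

-- ===== PORT B =====
-- the hand-written `while lo < hi` binary search of Source B (bisect_right on s for value t)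
def pvBisect (s : List Int) (t : Int) (lo hi : Int) : Int :=
  if h : lo < hi then
    let mid := PySem.Int.floordiv (lo + hi) 2
    if PySem.List.pyGetD s mid 0 ≤ t then pvBisect s t (mid + 1) hi
    else pvBisect s t lo mid
  else lo
termination_by (hi - lo).toNat
decreasing_by
  · have := PySem.Int.floordiv_two_mid_bounds (le_of_lt h)
    have h2 : PySem.Int.floordiv (lo + hi) 2 = (lo + hi) / 2 :=
      PySem.Int.floordiv_eq_ediv_of_pos (by omega)
    omega
  · have h2 : PySem.Int.floordiv (lo + hi) 2 = (lo + hi) / 2 :=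
      PySem.Int.floordiv_eq_ediv_of_pos (by omega)
    omega

def perfectPairs_alt (nums : List Int) : Int :=
  let s := PySem.List.sorted (nums.map (fun v => |v|)) (fun x => x) false
  let n : Int := s.length
  (PySem.List.enumerate s 0).foldl (fun ans p =>
    ans + (pvBisect s (2 * p.2) 0 n - (p.1 + 1))) 0

-- ===== PRECONDITION & SPEC =====
def Spec_perfectPairs (nums : List Int) (out : Int) : Prop := out = perfectPairs_alt nums
instance (nums : List Int) (out : Int) : Decidable (Spec_perfectPairs nums out) := by unfold Spec_perfectPairs; infer_instance

-- ===== CLAIM (what is proved, stated in full; the proofs are below) =====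
def Claim_equal_perfectPairs : Prop := ∀ (nums : List Int), Dom_perfectPairs nums → Spec_perfectPairs nums (perfectPairs nums)

-- ===== LEMMAS AND PROOFS =====

-- the pair predicate of the task, on two absolute values
def pvP (a b : Int) : Bool := decide (max a b ≤ 2 * min a b)

-- number of qualifying unordered pairs, grouped by the earlier element
def pvPairCount : List Int → Int
  | [] => 0
  | x :: xs => (xs.countP (fun y => pvP x y) : Int) + pvPairCount xs

theorem pvP_comm (a b : Int) : pvP a b = pvP b a := by
  simp [pvP, max_comm, min_comm]

theorem pvPairCount_perm {l l' : List Int} (h : l.Perm l') : pvPairCount l = pvPairCount l' := by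
  induction h with
  | nil => rfl
  | cons x _ ih => simp [pvPairCount, ih, List.Perm.countP_eq _ (by assumption)]
  | swap x y l =>
      simp only [pvPairCount, List.countP_cons]
      rw [pvP_comm x y]
      by_cases h : pvP y x <;> simp [h] <;> ring
  | trans _ _ ih1 ih2 => rw [ih1, ih2]

theorem pvPairCount_short (l : List Int) (h : l.length ≤ 1) : pvPairCount l = 0 := by
  match l, h with
  | [], _ => rfl
  | [x], _ => simp [pvPairCount]

theorem pvA_inner (nums : List Int) (c : Int) (a : Int) (ha : 0 ≤ a) (acc : Int) :
    (PySem.List.pyRange a (nums.length : Int) 1).foldl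
      (fun ans j => if max c |PySem.List.pyGetD nums j 0| ≤ 2 * min c |PySem.List.pyGetD nums j 0|
        then ans + 1 else ans) acc
    = acc + (((nums.drop a.toNat).countP (fun y => pvP c |y|)) : Int) := by
  rw [PySem.List.foldl_pyRange_pyGetD' nums 0
        (fun ans y => if max c |y| ≤ 2 * min c |y| then ans + 1 else ans) acc ha]
  have := PySem.List.foldl_count_if (fun y => pvP c |y|) (nums.drop a.toNat) acc
  simp only [pvP, decide_eq_true_eq] at this
  exact this

theorem pvA_outer (nums : List Int) : ∀ (k : Nat) (a : Int), 0 ≤ a →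
    ((nums.length : Int) - 1 - a).toNat = k → ∀ (acc : Int),
    (PySem.List.pyRange a ((nums.length : Int) - 1) 1).foldl (fun ans i =>
      (PySem.List.pyRange (i + 1) (nums.length : Int) 1).foldl (fun ans j =>
        let a := max |PySem.List.pyGetD nums i 0| |PySem.List.pyGetD nums j 0|
        let b := min |PySem.List.pyGetD nums i 0| |PySem.List.pyGetD nums j 0|
        if a ≤ 2 * b then ans + 1 else ans) ans) acc
    = acc + pvPairCount ((nums.map (fun v => |v|)).drop a.toNat) := by
  intro k
  induction k with
  | zero =>
      intro a ha hk acc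
      rw [PySem.List.pyRange_one_eq_nil (by omega)]
      rw [pvPairCount_short _ (by simp; omega)]
      simp
  | succ k ih =>
      intro a ha hk acc
      have hlt : a < (nums.length : Int) - 1 := by omega
      rw [PySem.List.pyRange_one_cons hlt]
      simp only [List.foldl_cons]
      have hlen : a.toNat < nums.length := by omega
      have hget : PySem.List.pyGetD nums a 0 = nums[a.toNat] :=
        PySem.List.pyGetD_eq_getElem nums 0 ha (by omega)
      rw [ih (a + 1) (by omega) (by omega)]
      have hinner := pvA_inner nums |nums[a.toNat]| (a + 1) (by omega) acc
      simp only [hget]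
      rw [hinner]
      have hdrop : (nums.map (fun v => |v|)).drop a.toNat
          = |nums[a.toNat]| :: (nums.map (fun v => |v|)).drop (a.toNat + 1) := by
        rw [List.drop_eq_getElem_cons (by simpa using hlen)]
        simp
      rw [hdrop]
      simp only [pvPairCount]
      have hcm : ((nums.map (fun v => |v|)).drop (a.toNat + 1)).countP (fun y => pvP |nums[a.toNat]| y)
          = (nums.drop (a.toNat + 1)).countP (fun y => pvP |nums[a.toNat]| |y|) := by
        rw [← List.map_drop, List.countP_map]
        rfl
      have hto : (a + 1).toNat = a.toNat + 1 := by omega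
      rw [hto] at *
      rw [hcm]
      ring

theorem pvA_eq_pairCount (nums : List Int) :
    perfectPairs nums = pvPairCount (nums.map (fun v => |v|)) := by
  show (PySem.List.pyRange 0 ((nums.length : Int) - 1) 1).foldl _ 0 = _
  rw [pvA_outer nums ((nums.length : Int) - 1 - 0).toNat 0 le_rfl rfl 0]
  simp

theorem pvCountP_of_split (s : List Int) (p : Int → Bool) (r : Nat) (hr : r ≤ s.length)
    (h1 : ∀ (k : Nat) (hk : k < s.length), k < r → p s[k])
    (h2 : ∀ (k : Nat) (hk : k < s.length), r ≤ k → ¬ p s[k]) :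
    s.countP p = r := by
  have hsplit : s = s.take r ++ s.drop r := (List.take_append_drop r s).symm
  rw [hsplit, List.countP_append]
  have htake : (s.take r).countP p = (s.take r).length := by
    rw [List.countP_eq_length]
    intro a ha
    rcases List.mem_take_iff_getElem.mp ha with ⟨j, hj, rfl⟩
    exact h1 j (by omega) (by omega)
  have hdrop : (s.drop r).countP p = 0 := by
    rw [List.countP_eq_zero]
    intro a ha
    rcases List.mem_iff_getElem.mp ha with ⟨j, hj, rfl⟩
    rw [List.getElem_drop]
    exact h2 (r + j) (by simp at hj; omega) (by omega)
  rw [htake, hdrop, List.length_take]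
  omega

theorem pvBisect_spec (s : List Int) (hs : s.Pairwise (· ≤ ·)) (t : Int) :
    ∀ (k : Nat) (lo hi : Int), 0 ≤ lo → lo ≤ hi → hi ≤ s.length → (hi - lo).toNat ≤ k →
    (∀ (j : Nat) (hj : j < s.length), (j : Int) < lo → s[j] ≤ t) →
    (∀ (j : Nat) (hj : j < s.length), hi ≤ (j : Int) → t < s[j]) →
    pvBisect s t lo hi = (s.countP (fun y => y ≤ t) : Int) := by
  intro k
  induction k with
  | zero =>
      intro lo hi h0 hlh hhl hk hlow hhigh
      have heq : lo = hi := by omega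
      rw [pvBisect, dif_neg (by omega)]
      have : s.countP (fun y => decide (y ≤ t)) = lo.toNat := by
        apply pvCountP_of_split _ _ lo.toNat (by omega)
        · intro j hj hjlo; exact decide_eq_true (hlow j hj (by omega))
        · intro j hj hjlo
          simp only [decide_eq_true_eq]
          exact not_le.mpr (hhigh j hj (by omega))
      rw [this]; omega
  | succ k ih =>
      intro lo hi h0 hlh hhl hk hlow hhigh
      by_cases h : lo < hi
      · rw [pvBisect, dif_pos h]
        show (if PySem.List.pyGetD s (PySem.Int.floordiv (lo + hi) 2) 0 ≤ t
            then pvBisect s t (PySem.Int.floordiv (lo + hi) 2 + 1) hi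
            else pvBisect s t lo (PySem.Int.floordiv (lo + hi) 2)) = _
        have hfd : PySem.Int.floordiv (lo + hi) 2 = (lo + hi) / 2 :=
          PySem.Int.floordiv_eq_ediv_of_pos (by omega)
        set mid := PySem.Int.floordiv (lo + hi) 2 with hmid
        have hmb : lo ≤ mid ∧ mid < hi := by rw [hfd]; omega
        have hmlen : mid.toNat < s.length := by omega
        have hget : PySem.List.pyGetD s mid 0 = s[mid.toNat] :=
          PySem.List.pyGetD_eq_getElem s 0 (by omega) (by omega)
        rw [hget]
        have hpair := List.pairwise_iff_getElem.mp hs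
        by_cases hc : s[mid.toNat] ≤ t
        · rw [if_pos hc]
          apply ih (mid + 1) hi (by omega) (by omega) hhl (by omega) _ hhigh
          intro j hj hjlo
          rcases Nat.lt_or_ge j mid.toNat with hj2 | hj2
          · exact le_trans (hpair j mid.toNat hj hmlen hj2) hc
          · have : j = mid.toNat := by omega
            subst this; exact hc
        · rw [if_neg hc]
          apply ih lo mid (by omega) (by omega) (by omega) (by omega) hlow
          intro j hj hjlo
          rcases Nat.lt_or_ge mid.toNat j with hj2 | hj2
          · exact lt_of_lt_of_le (not_le.mp hc) (hpair mid.toNat j hmlen hj hj2)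
          · have : j = mid.toNat := by omega
            subst this; exact not_le.mp hc
      · exact ih lo hi h0 hlh hhl (by omega) hlow hhigh

theorem pvB_fold (s : List Int) (hs : s.Pairwise (· ≤ ·)) (hnn : ∀ y ∈ s, 0 ≤ y) :
    ∀ (rest : List Int) (i : Nat), rest = s.drop i → ∀ (acc : Int),
    (PySem.List.enumerate rest (i : Int)).foldl (fun ans p =>
      ans + (pvBisect s (2 * p.2) 0 (s.length : Int) - (p.1 + 1))) acc
    = acc + pvPairCount rest := by
  intro rest
  induction rest with
  | nil => intro i h acc; simp [PySem.List.enumerate_nil, pvPairCount]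
  | cons x rest' ih =>
      intro i h acc
      have hi : i < s.length := by
        by_contra hge
        rw [List.drop_eq_nil_of_le (by omega)] at h
        simp at h
      have hx : s[i] = x := by
        have := List.drop_eq_getElem_cons hi
        rw [this] at h
        exact (List.cons_eq_cons.mp h.symm).1
      have hrest' : rest' = s.drop (i + 1) := by
        have := List.drop_eq_getElem_cons hi
        rw [this] at h
        exact ((List.cons_eq_cons.mp h.symm).2).symm
      have hxs : x ∈ s := hx ▸ List.getElem_mem hi
      have hx0 : 0 ≤ x := hnn x hxs
      -- the binary search counts all elements ≤ 2x
      have hbis : pvBisect s (2 * x) 0 (s.length : Int)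
          = (s.countP (fun y => y ≤ 2 * x) : Int) := by
        apply pvBisect_spec s hs (2 * x) s.length 0 (s.length : Int) le_rfl (by omega) le_rfl
          (by omega)
        · intro j hj hjlo; omega
        · intro j hj hjge; omega
      -- split the count at position i + 1
      have hsplit : s.countP (fun y => decide (y ≤ 2 * x))
          = (i + 1) + rest'.countP (fun y => pvP x y) := by
        have hdec : s = s.take (i + 1) ++ s.drop (i + 1) := (List.take_append_drop _ s).symm
        conv_lhs => rw [hdec]
        rw [List.countP_append]
        have hle_x : ∀ y ∈ s.take (i + 1), y ≤ x := by
          intro y hy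
          rcases List.mem_take_iff_getElem.mp hy with ⟨j, hj, rfl⟩
          rcases Nat.lt_or_ge j i with hj2 | hj2
          · have := (List.pairwise_iff_getElem.mp hs) j i (by omega) hi hj2
            rw [hx] at this; exact this
          · have : j = i := by omega
            subst this; exact le_of_eq hx
        have htake : (s.take (i + 1)).countP (fun y => decide (y ≤ 2 * x)) = i + 1 := by
          rw [List.countP_eq_length.mpr, List.length_take]
          · omega
          · intro a ha
            exact decide_eq_true (le_trans (hle_x a ha) (by omega))
        have hdropc : (s.drop (i + 1)).countP (fun y => decide (y ≤ 2 * x))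
            = rest'.countP (fun y => pvP x y) := by
          rw [← hrest']
          apply List.countP_congr
          intro y hy
          have hxy : x ≤ y := by
            have hpd : (s.drop i).Pairwise (· ≤ ·) := hs.drop
            rw [← h] at hpd
            exact (List.pairwise_cons.mp hpd).1 y (hrest' ▸ hy)
          simp [pvP, max_eq_right hxy, min_eq_left hxy]
        rw [htake, hdropc]
      rw [PySem.List.enumerate_cons, List.foldl_cons]
      have hcast : ((i : Int) + 1) = ((i + 1 : Nat) : Int) := by push_cast; ring
      rw [hcast, ih (i + 1) hrest']
      simp only [pvPairCount]
      rw [hbis]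
      have : (s.countP (fun y => decide (y ≤ 2 * x)) : Int)
          = (i + 1 : Int) + (rest'.countP (fun y => pvP x y) : Int) := by
        rw [hsplit]; push_cast; ring
      rw [this]
      push_cast
      ring

theorem pvB_eq_pairCount (nums : List Int) :
    perfectPairs_alt nums
      = pvPairCount (PySem.List.sorted (nums.map (fun v => |v|)) (fun x => x) false) := by
  set s := PySem.List.sorted (nums.map (fun v => |v|)) (fun x => x) false with hsdef
  have hs : s.Pairwise (· ≤ ·) := PySem.List.sorted_pairwise _ _
  have hnn : ∀ y ∈ s, 0 ≤ y := by
    intro y hy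
    rw [hsdef, PySem.List.mem_sorted] at hy
    rcases List.mem_map.mp hy with ⟨v, _, rfl⟩
    exact abs_nonneg v
  show (PySem.List.enumerate s ((0 : Nat) : Int)).foldl _ 0 = _
  rw [pvB_fold s hs hnn s 0 (by simp)]
  simp

-- ===== VERDICT (by name: the statement is the Claim_ definition above) =====
theorem perfectPairs_spec : Claim_equal_perfectPairs := by
  intro nums _
  unfold Spec_perfectPairs
  rw [pvA_eq_pairCount, pvB_eq_pairCount]
  exact (pvPairCount_perm (PySem.List.sorted_perm _ _ _)).symm
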